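-- pv_equiv track=rewrite | github.com/Chinyass/netcontrol | controllers/switch/Eltex_switch.py | _get_dec_vlans
-- ===== SOURCE A (Python) =====
-- def _get_dec_vlans(hex_vlans,num: int):
--     vlans = []
--     it = 0
--     for hex_num in hex_vlans:
--         if hex_num == '0':
--             it += 1
--         else:
--             n_bin = bin(int(hex_num, 16))[2:].zfill(4)
--             for i in range(len(n_bin)):
--                 if n_bin[i] == '1':
--                     vlans.append( str( 4*it + i+1 + num) )
--             it +=1
--     return vlans
-- ===== SOURCE B (Python) =====
-- def _get_dec_vlans(hex_vlans, num: int):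
--     value = 0
--     L = 0
--     for ch in hex_vlans:
--         value = value * 16 + int(ch, 16)
--         L += 1
--     vlans = []
--     for p in range(4 * L - 1, -1, -1):
--         if (value >> p) & 1:
--             vlans.append(str(4 * L - p + num))
--     return vlans
-- ===== Notes on version B (the rewrite author's own statement) =====
-- stated objective: alternative
-- what changed: B first folds the whole hex string into one big integer plus a digit count, then emits VLAN ids by a single high-to-low scan of that integer's bits ((value>>p)&1), instead of A's per-character decode via bin()/zfill(4) string inspection with an inner character loop.
import Mathlib
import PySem

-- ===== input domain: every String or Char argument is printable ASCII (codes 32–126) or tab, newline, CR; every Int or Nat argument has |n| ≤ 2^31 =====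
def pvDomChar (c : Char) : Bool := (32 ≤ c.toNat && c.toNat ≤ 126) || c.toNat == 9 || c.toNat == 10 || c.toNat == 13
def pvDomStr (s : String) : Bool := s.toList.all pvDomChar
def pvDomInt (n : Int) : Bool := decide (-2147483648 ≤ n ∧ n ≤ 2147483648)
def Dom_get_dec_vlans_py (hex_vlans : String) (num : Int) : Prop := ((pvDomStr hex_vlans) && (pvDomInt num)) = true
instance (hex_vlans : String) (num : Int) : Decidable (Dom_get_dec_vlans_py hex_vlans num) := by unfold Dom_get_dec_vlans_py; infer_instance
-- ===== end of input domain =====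

-- B decodes the hex bitmask by accumulating one big integer + a digit count, then scanning its bits
-- high-to-low, instead of A's per-character bin()/zfill string decoding (objective: alternative).

-- ===== PORT A =====
-- int(c, 16) for a single hex-digit character (Pre_ guarantees the argument is one)
def pvHexVal (c : Char) : Nat :=
  if 48 ≤ c.toNat ∧ c.toNat ≤ 57 then c.toNat - 48
  else if 97 ≤ c.toNat ∧ c.toNat ≤ 102 then c.toNat - 87
  else if 65 ≤ c.toNat ∧ c.toNat ≤ 70 then c.toNat - 55
  else 0  -- unreachable under Pre_ (Python raises ValueError there)

-- bin(n)[2:] : binary digits of n, most significant first ('' for n = 0, matching '0'.zfill later)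
def pvBin : Nat → List Char
  | 0 => []
  | n+1 => pvBin ((n+1)/2) ++ [if (n+1) % 2 = 1 then '1' else '0']
decreasing_by exact Nat.div_lt_self (Nat.succ_pos n) one_lt_two

def get_dec_vlans_py (hex_vlans : String) (num : Int) : List String :=
  (hex_vlans.toList.foldl (fun (st : List String × Int) hex_num =>
    if hex_num = '0' then (st.1, st.2 + 1)
    else
      -- n_bin = bin(int(hex_num,16))[2:].zfill(4)
      let n_bin : List Char :=
        List.replicate (4 - (pvBin (pvHexVal hex_num)).length) '0' ++ pvBin (pvHexVal hex_num)
      ((List.range n_bin.length).foldl (fun vlans i =>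
          if n_bin.getD i ' ' = '1'
          then vlans ++ [PySem.Int.toStr (4 * st.2 + (i : Int) + 1 + num)]
          else vlans) st.1,
       st.2 + 1)) ([], 0)).1

-- ===== PORT B =====
def get_dec_vlans_py_alt (hex_vlans : String) (num : Int) : List String :=
  let vl := hex_vlans.toList.foldl (fun (st : Nat × Nat) ch => (st.1 * 16 + pvHexVal ch, st.2 + 1)) (0, 0)
  -- range(4*L-1, -1, -1) visits p = 4L-1, …, 0, all ≥ 0: ported exactly as (List.range (4*L)).reverse
  (List.range (4 * vl.2)).reverse.foldl (fun vlans p =>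
    if (vl.1 >>> p) &&& 1 = 1
    then vlans ++ [PySem.Int.toStr (4 * (vl.2 : Int) - (p : Int) + num)]
    else vlans) []

-- ===== PRECONDITION & SPEC =====
def pvIsHexDigit (c : Char) : Bool :=
  (48 ≤ c.toNat && c.toNat ≤ 57) || (97 ≤ c.toNat && c.toNat ≤ 102) || (65 ≤ c.toNat && c.toNat ≤ 70)

-- Pre_ excludes exactly the inputs where A raises ValueError: a character that is not a hex digit
-- makes int(hex_num, 16) raise.
def Pre_get_dec_vlans_py (hex_vlans : String) (num : Int) : Prop :=
  hex_vlans.toList.all pvIsHexDigit = true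
instance (hex_vlans : String) (num : Int) : Decidable (Pre_get_dec_vlans_py hex_vlans num) := by
  unfold Pre_get_dec_vlans_py; infer_instance

def pvWitness_get_dec_vlans_py : String × Int := ("1aF0", 5)

def Spec_get_dec_vlans_py (hex_vlans : String) (num : Int) (out : List String) : Prop :=
  out = get_dec_vlans_py_alt hex_vlans num
instance (hex_vlans : String) (num : Int) (out : List String) : Decidable (Spec_get_dec_vlans_py hex_vlans num out) := by
  unfold Spec_get_dec_vlans_py; infer_instance

-- ===== CLAIM (what is proved, stated in full; the proofs are below) =====
def Claim_equal_get_dec_vlans_py : Prop := ∀ (hex_vlans : String) (num : Int), Dom_get_dec_vlans_py hex_vlans num → Pre_get_dec_vlans_py hex_vlans num → Spec_get_dec_vlans_py hex_vlans num (get_dec_vlans_py hex_vlans num)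

-- ===== LEMMAS AND PROOFS =====

-- per-digit output: labels 1+num … 4+num for bits 3 … 0 of the digit
def pvFour (d : Nat) (num : Int) : List String :=
  (if d.testBit 3 then [PySem.Int.toStr (1 + num)] else []) ++
  (if d.testBit 2 then [PySem.Int.toStr (2 + num)] else []) ++
  (if d.testBit 1 then [PySem.Int.toStr (3 + num)] else []) ++
  (if d.testBit 0 then [PySem.Int.toStr (4 + num)] else [])

-- common intermediate spec: concatenation of the per-digit outputs, label base advancing by 4
def pvM : List Nat → Int → List String
  | [], _ => []
  | d :: ds, num => pvFour d num ++ pvM ds (num + 4)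

def pvVal (ds : List Nat) : Nat := ds.foldl (fun v d => v * 16 + d) 0

theorem pvHexVal_lt (c : Char) (h : pvIsHexDigit c = true) : pvHexVal c < 16 := by
  simp [pvIsHexDigit] at h
  unfold pvHexVal
  split_ifs <;> omega

theorem pvM_congr (ds : List Nat) : ∀ a b : Int, a = b → pvM ds a = pvM ds b := by
  intro a b h; rw [h]



theorem pvInner (d : Nat) (hd : d < 16) (acc : List String) (it num : Int) :
    (List.range (List.replicate (4 - (pvBin d).length) '0' ++ pvBin d).length).foldl
      (fun vlans i =>
        if (List.replicate (4 - (pvBin d).length) '0' ++ pvBin d).getD i ' ' = '1'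
        then vlans ++ [PySem.Int.toStr (4 * it + (i : Int) + 1 + num)]
        else vlans) acc
    = acc ++ pvFour d (num + 4 * it) := by
  interval_cases d <;>
    simp [pvBin, pvFour, List.range_succ, List.foldl, Nat.testBit_succ, Nat.testBit_zero] <;>
    (repeat' apply And.intro) <;> first | trivial | (congr 1; ring)

theorem pvFoldA (num : Int) (cs : List Char) : ∀ (acc : List String) (it : Int),
    (∀ c ∈ cs, pvIsHexDigit c = true) →
    (cs.foldl (fun (st : List String × Int) hex_num =>
      if hex_num = '0' then (st.1, st.2 + 1)
      else
        let n_bin : List Char := List.replicate (4 - (pvBin (pvHexVal hex_num)).length) '0' ++ pvBin (pvHexVal hex_num)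
        ((List.range n_bin.length).foldl (fun vlans i =>
            if n_bin.getD i ' ' = '1'
            then vlans ++ [PySem.Int.toStr (4 * st.2 + (i : Int) + 1 + num)]
            else vlans) st.1,
        st.2 + 1)) (acc, it)).1
    = acc ++ pvM (cs.map pvHexVal) (num + 4 * it) := by
  induction cs with
  | nil => intro acc it _; simp [pvM]
  | cons c cs ih =>
    intro acc it h
    have hc : pvIsHexDigit c = true := h c (by simp)
    have hlt := pvHexVal_lt c hc
    have htail : ∀ x ∈ cs, pvIsHexDigit x = true := fun x hx => h x (List.mem_cons_of_mem _ hx)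
    by_cases h0 : c = '0'
    · subst h0
      have hz : pvHexVal '0' = 0 := rfl
      simp only [List.foldl_cons, List.map_cons]
      rw [ih _ _ htail, hz]
      have h4 : pvM (cs.map pvHexVal) (num + 4 * (it + 1)) = pvM (cs.map pvHexVal) ((num + 4 * it) + 4) :=
        pvM_congr _ _ _ (by ring)
      simp [pvM, pvFour, h4]
    · simp only [List.foldl_cons, if_neg h0, List.map_cons]
      rw [pvInner (pvHexVal c) hlt acc it num, ih _ _ htail]
      have h4 : pvM (cs.map pvHexVal) (num + 4 * (it + 1)) = pvM (cs.map pvHexVal) ((num + 4 * it) + 4) :=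
        pvM_congr _ _ _ (by ring)
      simp [pvM, h4]

theorem pvFoldBPair (cs : List Char) : ∀ v L : Nat,
    cs.foldl (fun (st : Nat × Nat) ch => (st.1 * 16 + pvHexVal ch, st.2 + 1)) (v, L)
    = ((cs.map pvHexVal).foldl (fun a d => a * 16 + d) v, L + cs.length) := by
  induction cs with
  | nil => intro v L; simp
  | cons c cs ih => intro v L; simp [ih, Nat.add_assoc, Nat.add_comm 1 cs.length]

theorem pvValShift (ds : List Nat) : ∀ v : Nat,
    ds.foldl (fun a d => a * 16 + d) v = v * 16 ^ ds.length + pvVal ds := by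
  induction ds with
  | nil => intro v; simp [pvVal]
  | cons d ds ih =>
    intro v
    have hd : pvVal (d :: ds) = d * 16 ^ ds.length + pvVal ds := by
      show ds.foldl _ (0 * 16 + d) = _
      rw [ih (0 * 16 + d)]; ring_nf
    simp only [List.foldl_cons, ih (v * 16 + d), hd, List.length_cons]
    ring

theorem pvValLt (ds : List Nat) (h : ∀ d ∈ ds, d < 16) : pvVal ds < 16 ^ ds.length := by
  induction ds with
  | nil => simp [pvVal]
  | cons d ds ih =>
    have hd : pvVal (d :: ds) = d * 16 ^ ds.length + pvVal ds := by
      show ds.foldl _ (0 * 16 + d) = _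
      rw [pvValShift ds (0 * 16 + d)]; ring_nf
    have h1 : d < 16 := h d (by simp)
    have h2 : pvVal ds < 16 ^ ds.length := ih (fun x hx => h x (List.mem_cons_of_mem _ hx))
    have : d * 16 ^ ds.length + pvVal ds < (d + 1) * 16 ^ ds.length := by nlinarith
    calc pvVal (d :: ds) < (d + 1) * 16 ^ ds.length := hd ▸ this
      _ ≤ 16 * 16 ^ ds.length := by nlinarith
      _ = 16 ^ (d :: ds).length := by rw [List.length_cons]; ring

theorem pvCond (v p : Nat) : (v >>> p &&& 1 = 1) ↔ v.testBit p = true := by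
  rw [Nat.shiftRight_eq_div_pow, Nat.and_one_is_mod, Nat.testBit_eq_decide_div_mod_eq]
  simp

theorem pvHeadFold (v d n w : Nat) (hv : v = 2 ^ n * d + w) (hw : w < 2 ^ n)
    (L num : Int) (hL : 4 * L = (n : Int) + 4) :
    [n+3, n+2, n+1, n].foldl (fun vlans p =>
      if v >>> p &&& 1 = 1 then vlans ++ [PySem.Int.toStr (4 * L - (p : Int) + num)] else vlans) []
    = pvFour d num := by
  have hb : ∀ k, (v >>> (n + k) % 2 = 1) ↔ d.testBit k = true := by
    intro k
    have ht : v.testBit (n + k) = d.testBit k := by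
      rw [hv, Nat.testBit_two_pow_mul_add d hw, if_neg (by omega)]
      congr 1; omega
    rw [← ht, Nat.testBit_eq_decide_div_mod_eq, Nat.shiftRight_eq_div_pow]
    simp
  have e0 : (v >>> n % 2 = 1) ↔ d.testBit 0 = true := by
    have := hb 0; rwa [Nat.add_zero] at this
  simp only [List.foldl_cons, List.foldl_nil]
  by_cases h3 : d.testBit 3 <;> by_cases h2 : d.testBit 2 <;>
    by_cases h1 : d.testBit 1 <;> by_cases h0 : d.testBit 0 <;>
    · simp [pvFour, h3, h2, h1, h0, hb 3, hb 2, hb 1, e0] <;>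
        (repeat' apply And.intro) <;> first | trivial | (congr 1; omega)

theorem pvScanB (ds : List Nat) : ∀ num : Int, (∀ d ∈ ds, d < 16) →
    (List.range (4 * ds.length)).reverse.foldl
      (fun vlans p => if (pvVal ds >>> p) &&& 1 = 1
        then vlans ++ [PySem.Int.toStr (4 * (ds.length : Int) - (p : Int) + num)]
        else vlans) []
    = pvM ds num := by
  induction ds with
  | nil => intro num _; simp [pvM]
  | cons d ds ih =>
    intro num h
    have hd16 : d < 16 := h d (by simp)
    have htail : ∀ x ∈ ds, x < 16 := fun x hx => h x (List.mem_cons_of_mem _ hx)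
    set n := 4 * ds.length with hn
    have hv : pvVal (d :: ds) = 2 ^ n * d + pvVal ds := by
      show ds.foldl _ (0 * 16 + d) = _
      rw [pvValShift ds (0 * 16 + d), hn, pow_mul]
      norm_num [Nat.mul_comm]
    have hw : pvVal ds < 2 ^ n := by
      show pvVal ds < 2 ^ (4 * ds.length)
      calc pvVal ds < 16 ^ ds.length := pvValLt ds htail
        _ = 2 ^ (4 * ds.length) := by rw [pow_mul]; norm_num
    have hlen : 4 * (d :: ds).length = n + 4 := by rw [List.length_cons, hn]; ring
    have hsplit : (List.range (4 * (d :: ds).length)).reverse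
        = [n+3, n+2, n+1, n] ++ (List.range n).reverse := by
      rw [hlen, show n + 4 = (n+3) + 1 by omega, List.range_succ,
        show n + 3 = (n+2) + 1 by omega, List.range_succ,
        show n + 2 = (n+1) + 1 by omega, List.range_succ, List.range_succ]
      simp
    rw [hsplit, List.foldl_append]
    rw [show
        List.foldl (fun vlans p =>
          if pvVal (d :: ds) >>> p &&& 1 = 1
          then vlans ++ [PySem.Int.toStr (4 * ((d :: ds).length : Int) - (p : Int) + num)]
          else vlans) [] [n+3, n+2, n+1, n] = pvFour d num from
      pvHeadFold (pvVal (d :: ds)) d n (pvVal ds) hv hw ((d :: ds).length : Int) num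
        (by rw [List.length_cons, hn]; push_cast; ring)]
    rw [PySem.List.foldl_append_ite]
    have ihh := ih (num + 4) htail
    rw [PySem.List.foldl_append_ite] at ihh
    simp only [List.nil_append] at ihh
    rw [show pvM (d :: ds) num = pvFour d num ++ pvM ds (num + 4) from rfl, ← ihh]
    congr 1
    rw [List.filter_congr]
    · apply List.map_congr_left
      intro p _
      congr 1
      push_cast [List.length_cons]
      ring
    · intro p hp
      have hpn : p < n := by
        rw [List.mem_reverse, List.mem_range] at hp; exact hp
      have ht : (pvVal (d :: ds)).testBit p = (pvVal ds).testBit p := by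
        rw [hv, Nat.testBit_two_pow_mul_add d hw, if_pos hpn]
      exact decide_eq_decide.mpr (by rw [pvCond, pvCond, ht])

theorem pvMain (hex_vlans : String) (num : Int)
    (hpre : ∀ c ∈ hex_vlans.toList, pvIsHexDigit c = true) :
    get_dec_vlans_py hex_vlans num = get_dec_vlans_py_alt hex_vlans num := by
  have hds : ∀ x ∈ hex_vlans.toList.map pvHexVal, x < 16 := by
    intro x hx
    rcases List.mem_map.mp hx with ⟨c, hc, rfl⟩
    exact pvHexVal_lt c (hpre c hc)
  have hA : get_dec_vlans_py hex_vlans num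
      = [] ++ pvM (hex_vlans.toList.map pvHexVal) (num + 4 * 0) :=
    pvFoldA num hex_vlans.toList [] 0 hpre
  have hB : get_dec_vlans_py_alt hex_vlans num
      = pvM (hex_vlans.toList.map pvHexVal) num := by
    unfold get_dec_vlans_py_alt
    rw [pvFoldBPair hex_vlans.toList 0 0]
    simp only [Nat.zero_add]
    rw [show ((hex_vlans.toList.map pvHexVal).foldl (fun a d => a * 16 + d) 0)
        = pvVal (hex_vlans.toList.map pvHexVal) from rfl,
      show hex_vlans.toList.length = (hex_vlans.toList.map pvHexVal).length by
        rw [List.length_map]]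
    exact pvScanB (hex_vlans.toList.map pvHexVal) num hds
  rw [hA, hB, List.nil_append]
  exact pvM_congr _ _ _ (by ring)

-- ===== VERDICT (by name: the statement is the Claim_ definition above) =====
theorem get_dec_vlans_py_spec : Claim_equal_get_dec_vlans_py := by
  intro hex_vlans num _ hpre
  unfold Spec_get_dec_vlans_py
  exact pvMain hex_vlans num (by rw [Pre_get_dec_vlans_py, List.all_eq_true] at hpre; exact hpre)
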